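-- pv_equiv track=rewrite | github.com/zqh0429/DynamicBlockSize | llada/eval_dynamic_vis.py | _find_code_start_index
-- ===== SOURCE A (Python) =====
-- def _find_code_start_index(generated_tokens):
--     """Heuristic: find where the answer starts entering actual code rather than explanation text."""
--     if not generated_tokens:
--         return None
--
--     prefixes = ["```python", "```", "\ndef ", "\nfrom ", "\nimport ", "\nclass ", "\nif __name__"]
--     text = ""
--     for idx, token in enumerate(generated_tokens):
--         text += token
--         if any(marker in text for marker in prefixes):
--             return idx
--     return None
-- ===== SOURCE B (Python) =====
-- def _find_code_start_index(generated_tokens):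
--     """Heuristic: find where the answer starts entering actual code rather than explanation text."""
--     prefixes = ["```python", "```", "\ndef ", "\nfrom ", "\nimport ", "\nclass ", "\nif __name__"]
--     # Join once, locate each marker's first occurrence once, then map the earliest
--     # occurrence end back to the token index via a running length sum.
--     full = "".join(generated_tokens)
--     ends = [full.find(m) + len(m) for m in prefixes if m in full]
--     if not ends:
--         return None
--     target = min(ends)
--     total = 0
--     for idx, token in enumerate(generated_tokens):
--         total += len(token)
--         if total >= target:
--             return idx
--     return None
-- ===== Notes on version B (the rewrite author's own statement) =====
-- stated objective: faster
-- what changed: Instead of re-searching the whole growing text for every marker after each appended token, B joins the tokens once, locates each marker's first occurrence once with str.find, takes the minimal occurrence end, and maps it back to a token index with a single running sum of token lengths.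
import Mathlib
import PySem

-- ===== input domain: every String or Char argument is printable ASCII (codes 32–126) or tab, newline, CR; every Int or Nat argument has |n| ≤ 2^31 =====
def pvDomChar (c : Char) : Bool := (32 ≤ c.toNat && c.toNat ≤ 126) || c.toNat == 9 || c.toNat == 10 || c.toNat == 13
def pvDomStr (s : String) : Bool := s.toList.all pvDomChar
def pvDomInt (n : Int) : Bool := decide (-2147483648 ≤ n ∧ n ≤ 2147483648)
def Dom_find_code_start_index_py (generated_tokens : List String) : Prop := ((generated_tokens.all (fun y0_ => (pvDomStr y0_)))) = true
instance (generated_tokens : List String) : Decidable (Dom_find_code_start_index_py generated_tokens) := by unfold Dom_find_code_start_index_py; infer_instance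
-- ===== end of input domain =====

-- B joins the tokens once, finds each marker's first occurrence once, and maps the earliest
-- occurrence end back to a token index with a running length sum (objective: faster, asymptotic).

-- the marker list (shared literal constant of both Pythons), as character lists
def pvPrefixes : List (List Char) :=
  ["```python".toList, "```".toList, "\ndef ".toList, "\nfrom ".toList,
   "\nimport ".toList, "\nclass ".toList, "\nif __name__".toList]

-- ===== PORT A =====
-- the 'for idx, token in enumerate(...)' loop: state = (remaining tokens, idx, accumulated text)
def pvAGo : List String → Int → List Char → Option Int
  | [], _, _ => none
  | tok :: rest, idx, text =>
    let text' := text ++ tok.toList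
    if pvPrefixes.any (fun m => PySem.Chars.isIn m text') then some idx
    else pvAGo rest (idx + 1) text'

def find_code_start_index_py (generated_tokens : List String) : Option Int :=
  if generated_tokens = [] then none
  else pvAGo generated_tokens 0 []

-- ===== PORT B =====
-- the comprehension '[full.find(m) + len(m) for m in prefixes if m in full]'
def pvEnds (full : List Char) : List Int :=
  pvPrefixes.filterMap (fun m =>
    if PySem.Chars.isIn m full then some (PySem.Chars.find full m + m.length) else none)

-- the 'for idx, token in enumerate(...)' running-length loop
def pvBScan : List String → Int → Int → Int → Option Int
  | [], _, _, _ => none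
  | tok :: rest, idx, total, target =>
    let total' := total + (tok.toList.length : Int)
    if target ≤ total' then some idx else pvBScan rest (idx + 1) total' target

def find_code_start_index_py_alt (generated_tokens : List String) : Option Int :=
  let full := (generated_tokens.map String.toList).flatten
  match PySem.List.min? (pvEnds full) (fun x => x) with
  | none => none
  | some target => pvBScan generated_tokens 0 0 target

-- ===== PRECONDITION & SPEC =====
def Spec_find_code_start_index_py (generated_tokens : List String) (out : Option Int) : Prop := out = find_code_start_index_py_alt generated_tokens
instance (generated_tokens : List String) (out : Option Int) : Decidable (Spec_find_code_start_index_py generated_tokens out) := by unfold Spec_find_code_start_index_py; infer_instance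

-- ===== CLAIM (what is proved, stated in full; the proofs are below) =====
def Claim_equal_find_code_start_index_py : Prop := ∀ (generated_tokens : List String), Dom_find_code_start_index_py generated_tokens → Spec_find_code_start_index_py generated_tokens (find_code_start_index_py generated_tokens)

-- ===== LEMMAS AND PROOFS =====

-- every marker is nonempty
theorem pvPrefixes_ne_nil : ∀ m ∈ pvPrefixes, 1 ≤ m.length := by decide

-- an occurrence of m at j that ends at or before k is an occurrence inside F.take k
theorem pv_occ_take (m F : List Char) (j k : ℕ) (hp : m <+: F.drop j)
    (hk : j + m.length ≤ k) : m <:+: F.take k := by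
  obtain ⟨b, hb⟩ := hp
  have h2 : m <+: (F.take k).drop j := by
    rw [List.drop_take, ← hb, List.take_append, List.take_of_length_le (by omega)]
    exact ⟨_, rfl⟩
  exact h2.isInfix.trans (List.drop_suffix j _).isInfix

-- an occurrence inside F.take k is an occurrence in F that ends at or before k
theorem pv_take_occ (m F : List Char) (k : ℕ) (h : m <:+: F.take k) :
    ∃ j, j + m.length ≤ k ∧ m <+: F.drop j := by
  obtain ⟨a, b, hab⟩ := h
  refine ⟨a.length, ?_, ?_⟩
  · have := congrArg List.length hab
    simp only [List.length_append, List.length_take] at this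
    omega
  · have hF : F = F.take k ++ F.drop k := (List.take_append_drop k F).symm
    have ha : a.length ≤ (F.take k).length := by
      have := congrArg List.length hab
      simp only [List.length_append] at this
      omega
    rw [hF, List.drop_append_of_le_length ha, ← hab, List.append_assoc, List.drop_left]
    exact ⟨b ++ F.drop k, by rw [List.append_assoc]⟩

-- ends is empty iff no marker occurs in F
theorem pv_ends_nil (F : List Char) : pvEnds F = [] ↔ ∀ m ∈ pvPrefixes, ¬ m <:+: F := by
  unfold pvEnds
  rw [List.filterMap_eq_nil_iff]
  constructor
  · intro h m hm hc
    have := h m hm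
    rw [if_pos ((PySem.Chars.isIn_iff_infix m F).mpr hc)] at this
    exact Option.some_ne_none _ this
  · intro h m hm
    rw [if_neg]
    rw [Bool.not_eq_true, PySem.Chars.isIn_eq_false_iff]
    exact h m hm

-- with target = min(ends): a marker occurs in F.take k iff target ≤ k
theorem pv_key (F : List Char) (target : Int)
    (ht : PySem.List.min? (pvEnds F) (fun x => x) = some target) (k : ℕ) :
    (∃ m ∈ pvPrefixes, m <:+: F.take k) ↔ target ≤ (k : Int) := by
  constructor
  · rintro ⟨m, hm, hinf⟩
    obtain ⟨j, hj, hp⟩ := pv_take_occ m F k hinf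
    have hinfF : m <:+: F := hp.isInfix.trans (List.drop_suffix j F).isInfix
    have hisin : PySem.Chars.isIn m F = true := (PySem.Chars.isIn_iff_infix m F).mpr hinfF
    have hmem : (PySem.Chars.find F m + (m.length : Int)) ∈ pvEnds F :=
      List.mem_filterMap.mpr ⟨m, hm, by rw [if_pos hisin]⟩
    have hmin := PySem.List.min?_isMin ht _ hmem
    have hnn : 0 ≤ PySem.Chars.find F m := (PySem.Chars.find_nonneg_iff F m).mpr hinfF
    have hspec := (PySem.Chars.find_spec hnn).2
    have hle : (PySem.Chars.find F m).toNat ≤ j := by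
      by_contra hlt
      exact hspec j (by omega) hp
    have := Int.toNat_of_nonneg hnn
    simp only at hmin
    omega
  · intro hk
    have hmem := PySem.List.min?_mem ht
    obtain ⟨m, hm, hfm⟩ := List.mem_filterMap.mp hmem
    by_cases hisin : PySem.Chars.isIn m F = true
    · rw [if_pos hisin] at hfm
      have htar : target = PySem.Chars.find F m + (m.length : Int) :=
        (Option.some.injEq _ _ ▸ hfm).symm
      have hnn : 0 ≤ PySem.Chars.find F m :=
        (PySem.Chars.find_nonneg_iff F m).mpr ((PySem.Chars.isIn_iff_infix m F).mp hisin)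
      have hp := (PySem.Chars.find_spec hnn).1
      refine ⟨m, hm, pv_occ_take m F (PySem.Chars.find F m).toNat k hp ?_⟩
      have := Int.toNat_of_nonneg hnn
      omega
    · rw [if_neg hisin] at hfm
      exact absurd hfm (by simp)

-- none case: no marker ever occurs, so A's loop returns none
theorem pv_loop_none (F : List Char) (hF : ∀ m ∈ pvPrefixes, ¬ m <:+: F) :
    ∀ (toks : List String) (idx : Int) (text : List Char),
      text ++ (toks.map String.toList).flatten = F → pvAGo toks idx text = none := by
  intro toks
  induction toks with
  | nil => intro idx text _; rfl
  | cons tok rest ih =>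
    intro idx text heq
    have heq' : (text ++ tok.toList) ++ ((rest.map String.toList)).flatten = F := by
      simpa [List.append_assoc] using heq
    simp only [pvAGo]
    rw [if_neg, ih (idx + 1) (text ++ tok.toList) heq']
    rw [Bool.not_eq_true, List.any_eq_false]
    intro m hm
    rw [Bool.not_eq_true, PySem.Chars.isIn_eq_false_iff]
    intro hc
    exact hF m hm (hc.trans ⟨[], (rest.map String.toList).flatten, by simpa using heq'⟩)

-- some case: A's accumulate-and-search loop equals B's running-length scan
theorem pv_loop_some (F : List Char) (target : Int)
    (ht : PySem.List.min? (pvEnds F) (fun x => x) = some target) :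
    ∀ (toks : List String) (idx : Int) (text : List Char),
      text ++ (toks.map String.toList).flatten = F →
      ¬ target ≤ (text.length : Int) →
      pvAGo toks idx text = pvBScan toks idx (text.length : Int) target := by
  intro toks
  induction toks with
  | nil => intro idx text _ _; rfl
  | cons tok rest ih =>
    intro idx text heq hlt
    have heq' : (text ++ tok.toList) ++ ((rest.map String.toList)).flatten = F := by
      simpa [List.append_assoc] using heq
    have htake : F.take (text ++ tok.toList).length = text ++ tok.toList := by
      rw [← heq']; exact List.take_left
    have hcond : (pvPrefixes.any fun m => PySem.Chars.isIn m (text ++ tok.toList)) = true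
        ↔ target ≤ ((text ++ tok.toList).length : Int) := by
      rw [List.any_eq_true, ← pv_key F target ht, htake]
      constructor
      · rintro ⟨m, hm, hc⟩; exact ⟨m, hm, (PySem.Chars.isIn_iff_infix _ _).mp hc⟩
      · rintro ⟨m, hm, hc⟩; exact ⟨m, hm, (PySem.Chars.isIn_iff_infix _ _).mpr hc⟩
    have hlen : ((text ++ tok.toList).length : Int)
        = (text.length : Int) + (tok.toList.length : Int) := by
      rw [List.length_append]; push_cast; ring
    simp only [pvAGo, pvBScan]
    by_cases hc : target ≤ (text.length : Int) + (tok.toList.length : Int)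
    · rw [if_pos (hcond.mpr (hlen ▸ hc)), if_pos hc]
    · rw [if_neg (fun h => hc (hlen ▸ hcond.mp h)), if_neg hc,
        ih (idx + 1) (text ++ tok.toList) heq' (fun h => hc (hlen ▸ h)), hlen]

-- members of pvEnds are positive
theorem pv_ends_pos (F : List Char) (e : Int) (he : e ∈ pvEnds F) : 1 ≤ e := by
  obtain ⟨m, hm, hfm⟩ := List.mem_filterMap.mp he
  by_cases hisin : PySem.Chars.isIn m F = true
  · rw [if_pos hisin] at hfm
    have hnn : 0 ≤ PySem.Chars.find F m :=
      (PySem.Chars.find_nonneg_iff F m).mpr ((PySem.Chars.isIn_iff_infix m F).mp hisin)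
    have hlen := pvPrefixes_ne_nil m hm
    have : e = PySem.Chars.find F m + (m.length : Int) := (Option.some.injEq _ _ ▸ hfm).symm
    omega
  · rw [if_neg hisin] at hfm
    exact absurd hfm (by simp)

-- ===== VERDICT (by name: the statement is the Claim_ definition above) =====
theorem find_code_start_index_py_spec : Claim_equal_find_code_start_index_py := by
  intro gts _
  unfold Spec_find_code_start_index_py find_code_start_index_py find_code_start_index_py_alt
  cases hmin : PySem.List.min? (pvEnds ((gts.map String.toList).flatten)) (fun x => x) with
  | none =>
    have hnone : ∀ m ∈ pvPrefixes, ¬ m <:+: (gts.map String.toList).flatten :=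
      (pv_ends_nil _).mp ((PySem.List.min?_eq_none_iff _ _).mp hmin)
    simp only [hmin]
    by_cases h : gts = []
    · rw [if_pos h]
    · rw [if_neg h]
      exact pv_loop_none _ hnone gts 0 [] (by simp)
  | some target =>
    have hpos : 1 ≤ target := pv_ends_pos _ _ (PySem.List.min?_mem hmin)
    have hne : gts ≠ [] := by
      intro h
      subst h
      rw [show pvEnds (([] : List String).map String.toList).flatten = [] from by decide] at hmin
      simp [PySem.List.min?] at hmin
    simp only [hmin, if_neg hne]
    have := pv_loop_some _ target hmin gts 0 [] (by simp) (by simp; omega)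
    simpa using this
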